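-- pv_equiv track=rewrite | github.com/quic/aimet | TrainingExtensions/common/src/python/aimet_common/winnow/winnow_utils.py | get_indices_among_ones_of_overlapping_ones
-- ===== SOURCE A (Python) =====
-- from typing import List, Set, Union
--
-- def get_indices_among_ones_of_overlapping_ones(more_ones_mask: List[int], less_ones_mask: List[int]) -> List[int]:
--     """
--     :param more_ones_mask: Mask that has more ones
--     :param less_ones_mask: Mask that has less ones
--     :return: A list of indices of where the overlapping ones occur between the two masks, where the indices are counted
--     looking only at the ones in more_ones_mask.
--     It is assumed that wherever less_ones_mask has a 1, more_ones_mask also has a 1 in that position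
--     Example:
--     more_ones_mask: 1, 0, 0, 1, 1, 0, 1, 0, 1, 1
--     less_ones_mask: 1, 0, 0, 0, 1, 0, 0, 0, 1, 0
--                     *           *           *
--     Overlapping ones are represented by the stars above.  If we are indexing using the full list, we would say that
--     the overlapping ones are indexes 0, 4, and 8.  However, we only consider the indexes by looking at the positions
--     in more_ones_mask that have ones.  So we can see that it is the 0th, 2nd, and 4th ones in more_ones_mask that have
--     overlapping ones with less_ones_mask.  Thus the index list that is returned will be [0, 2, 4].
--     """
--
--     indices = []
--     more_ones_mask_ones_index = 0
--     for index, mask_item in enumerate(more_ones_mask):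
--         if mask_item & less_ones_mask[index]:
--             indices.append(more_ones_mask_ones_index)
--         if mask_item:
--             more_ones_mask_ones_index += 1
--
--     return indices
-- ===== SOURCE B (Python) =====
-- def get_indices_among_ones_of_overlapping_ones(more_ones_mask, less_ones_mask):
--     # Pass 1: prefix-rank table; before[i] = number of truthy entries of more_ones_mask before index i.
--     before = []
--     count = 0
--     for mask_item in more_ones_mask:
--         before.append(count)
--         if mask_item:
--             count += 1
--     # Pass 2: collect ranks where the masks overlap.
--     return [b for x, y, b in zip(more_ones_mask, less_ones_mask, before) if x & y]
-- ===== Notes on version B (the rewrite author's own statement) =====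
-- stated objective: alternative
-- what changed: Replaces A's single interleaved loop with a running ones-counter by two separate passes: first a prefix-rank table of ones counts, then a zip comprehension that collects the precomputed rank wherever the bitwise overlap is truthy.
import Mathlib
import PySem

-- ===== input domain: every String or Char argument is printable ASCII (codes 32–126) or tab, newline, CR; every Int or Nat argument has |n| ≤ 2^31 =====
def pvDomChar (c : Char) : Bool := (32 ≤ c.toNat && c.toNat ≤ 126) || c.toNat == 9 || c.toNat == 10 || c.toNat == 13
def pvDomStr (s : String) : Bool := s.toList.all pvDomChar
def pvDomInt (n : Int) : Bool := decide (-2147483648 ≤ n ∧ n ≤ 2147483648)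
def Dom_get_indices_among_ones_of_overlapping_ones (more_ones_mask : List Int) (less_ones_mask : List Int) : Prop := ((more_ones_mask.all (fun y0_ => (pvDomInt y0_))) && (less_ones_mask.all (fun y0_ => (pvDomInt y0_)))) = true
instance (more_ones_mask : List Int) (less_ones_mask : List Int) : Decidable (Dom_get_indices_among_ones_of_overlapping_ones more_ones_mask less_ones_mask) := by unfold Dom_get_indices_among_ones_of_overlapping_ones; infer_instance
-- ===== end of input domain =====

-- ===== PORT A =====
-- B is an alternative decomposition (two passes: prefix-rank table, then a zip comprehension);
-- equivalence is proved on inputs where less_ones_mask is at least as long as more_ones_mask (elsewhere A raises IndexError).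
-- pvStepA: one iteration of A's loop; state = (indices, index, more_ones_mask_ones_index).
def pvStepA (less_ones_mask : List Int) (st : List Int × Int × Int) (mask_item : Int) : List Int × Int × Int :=
  let indices := if PySem.Int.band mask_item (PySem.List.pyGetD less_ones_mask st.2.1 0) ≠ 0 then st.1 ++ [st.2.2] else st.1
  let cnt := if mask_item ≠ 0 then st.2.2 + 1 else st.2.2
  (indices, st.2.1 + 1, cnt)

def get_indices_among_ones_of_overlapping_ones (more_ones_mask : List Int) (less_ones_mask : List Int) : List Int :=
  (more_ones_mask.foldl (pvStepA less_ones_mask) ([], 0, 0)).1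

-- ===== PORT B =====
def get_indices_among_ones_of_overlapping_ones_alt (more_ones_mask : List Int) (less_ones_mask : List Int) : List Int :=
  -- pass 1: prefix-rank table (before[i] = number of truthy entries before index i)
  let before := (more_ones_mask.foldl (fun (st : List Int × Int) x =>
      (st.1 ++ [st.2], if x ≠ 0 then st.2 + 1 else st.2)) ([], 0)).1
  -- pass 2: zip comprehension collecting the precomputed rank wherever the bitwise overlap is truthy
  (more_ones_mask.zip (less_ones_mask.zip before)).filterMap
    (fun p => if PySem.Int.band p.1 p.2.1 ≠ 0 then some p.2.2 else none)

-- ===== PRECONDITION & SPEC =====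
-- Pre_ excludes exactly the inputs where A raises IndexError: less_ones_mask shorter than more_ones_mask.
def Pre_get_indices_among_ones_of_overlapping_ones (more_ones_mask : List Int) (less_ones_mask : List Int) : Prop :=
  more_ones_mask.length ≤ less_ones_mask.length
instance (more_ones_mask : List Int) (less_ones_mask : List Int) : Decidable (Pre_get_indices_among_ones_of_overlapping_ones more_ones_mask less_ones_mask) := by unfold Pre_get_indices_among_ones_of_overlapping_ones; infer_instance
def pvWitness_get_indices_among_ones_of_overlapping_ones : List Int × List Int := ([1, 0, 0, 1, 1], [1, 0, 0, 0, 1])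

def Spec_get_indices_among_ones_of_overlapping_ones (more_ones_mask : List Int) (less_ones_mask : List Int) (out : List Int) : Prop := out = get_indices_among_ones_of_overlapping_ones_alt more_ones_mask less_ones_mask
instance (more_ones_mask : List Int) (less_ones_mask : List Int) (out : List Int) : Decidable (Spec_get_indices_among_ones_of_overlapping_ones more_ones_mask less_ones_mask out) := by unfold Spec_get_indices_among_ones_of_overlapping_ones; infer_instance

-- ===== CLAIM (what is proved, stated in full; the proofs are below) =====
def Claim_equal_get_indices_among_ones_of_overlapping_ones : Prop := ∀ (more_ones_mask : List Int) (less_ones_mask : List Int), Dom_get_indices_among_ones_of_overlapping_ones more_ones_mask less_ones_mask → Pre_get_indices_among_ones_of_overlapping_ones more_ones_mask less_ones_mask → Spec_get_indices_among_ones_of_overlapping_ones more_ones_mask less_ones_mask (get_indices_among_ones_of_overlapping_ones more_ones_mask less_ones_mask)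

-- ===== LEMMAS AND PROOFS =====

-- reference recursion: walk both masks together with the running rank
def pvRef : List Int → List Int → Int → List Int
  | [], _, _ => []
  | _ :: _, [], _ => []
  | x :: ms, y :: ls, cnt =>
      (if PySem.Int.band x y ≠ 0 then [cnt] else []) ++ pvRef ms ls (if x ≠ 0 then cnt + 1 else cnt)

-- prefix counts starting from cnt
def pvPC : List Int → Int → List Int
  | [], _ => []
  | x :: ms, cnt => cnt :: pvPC ms (if x ≠ 0 then cnt + 1 else cnt)

theorem pvBefore_eq : ∀ (ms : List Int) (acc : List Int) (cnt : Int),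
    (ms.foldl (fun (st : List Int × Int) x =>
      (st.1 ++ [st.2], if x ≠ 0 then st.2 + 1 else st.2)) (acc, cnt)).1 = acc ++ pvPC ms cnt := by
  intro ms
  induction ms with
  | nil => intro acc cnt; simp [pvPC]
  | cons x ms ih =>
    intro acc cnt
    simp only [List.foldl_cons]
    rw [ih]
    simp [pvPC]

theorem pvB_eq_ref : ∀ (ms ls : List Int) (cnt : Int),
    (ms.zip (ls.zip (pvPC ms cnt))).filterMap
      (fun p => if PySem.Int.band p.1 p.2.1 ≠ 0 then some p.2.2 else none) = pvRef ms ls cnt := by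
  intro ms
  induction ms with
  | nil => intro ls cnt; simp [pvRef]
  | cons x ms ih =>
    intro ls cnt
    cases ls with
    | nil => simp [pvPC, pvRef]
    | cons y ls =>
      simp only [pvPC, pvRef, List.zip_cons_cons, List.filterMap_cons, ih]
      by_cases h : PySem.Int.band x y = 0 <;> simp [h]

theorem pvA_loop : ∀ (ms less : List Int) (k : Nat) (acc : List Int) (cnt : Int),
    ms.length ≤ (less.drop k).length →
    (ms.foldl (pvStepA less) (acc, (k : Int), cnt)).1 = acc ++ pvRef ms (less.drop k) cnt := by
  intro ms
  induction ms with
  | nil => intro less k acc cnt _; simp [pvRef]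
  | cons x ms ih =>
    intro less k acc cnt hlen
    have hk : k < less.length := by
      simp [List.length_drop] at hlen; omega
    have hdrop : less.drop k = less[k] :: less.drop (k + 1) := List.drop_eq_getElem_cons hk
    have hget : PySem.List.pyGetD less (k : Int) 0 = less[k] := PySem.List.pyGetD_ofNat less k 0 hk
    have hcast : ((k : Int) + 1) = ((k + 1 : Nat) : Int) := by push_cast; ring
    simp only [List.foldl_cons, pvStepA, hget, hcast]
    rw [ih less (k + 1) _ _ (by simp only [List.length_drop, List.length_cons] at hlen ⊢; omega)]
    rw [hdrop]
    simp only [pvRef]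
    split <;> simp

-- ===== VERDICT (by name: the statement is the Claim_ definition above) =====
theorem get_indices_among_ones_of_overlapping_ones_spec : Claim_equal_get_indices_among_ones_of_overlapping_ones := by
  intro more less _ hpre
  unfold Spec_get_indices_among_ones_of_overlapping_ones
  unfold get_indices_among_ones_of_overlapping_ones get_indices_among_ones_of_overlapping_ones_alt
  simp only [pvBefore_eq, List.nil_append, pvB_eq_ref]
  have := pvA_loop more less 0 [] 0 (by simpa using hpre)
  simpa using this
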